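-- pv_equiv track=rewrite | github.com/prashanthr11/Code-Chef | May Cook-Off 2020 Division 2/CHEFRECP.py | check
-- ===== SOURCE A (Python) =====
-- from collections import defaultdict
--
-- def check(l):
--     d = defaultdict(lambda: 0)
--     for i in range(len(l)):
--         if d[l[i]]:
--             if l[i - 1] == l[i]:
--                 d[l[i]] += 1
--             else:
--                 return 'NO'
--         else:
--             d[l[i]] += 1
--     if len(set(d.keys())) == len(set(d.values())):
--         return 'YES'
--     else:
--         return 'NO'
-- ===== SOURCE B (Python) =====
-- from itertools import groupby
--
-- def check(l):
--     # run-length encode: consecutive equal blocks as (value, length)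
--     runs = [(v, sum(1 for _ in g)) for v, g in groupby(l)]
--     if len(set(v for v, _ in runs)) != len(runs):
--         return 'NO'  # some value occurs in two non-adjacent places
--     return 'YES' if len(set(n for _, n in runs)) == len(runs) else 'NO'
-- ===== Notes on version B (the rewrite author's own statement) =====
-- stated objective: idiomatic
-- what changed: Replaced the index loop with a defaultdict of counts plus an adjacency test by an itertools.groupby run-length encoding followed by two distinctness checks (distinct run values, distinct run lengths).
import Mathlib
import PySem

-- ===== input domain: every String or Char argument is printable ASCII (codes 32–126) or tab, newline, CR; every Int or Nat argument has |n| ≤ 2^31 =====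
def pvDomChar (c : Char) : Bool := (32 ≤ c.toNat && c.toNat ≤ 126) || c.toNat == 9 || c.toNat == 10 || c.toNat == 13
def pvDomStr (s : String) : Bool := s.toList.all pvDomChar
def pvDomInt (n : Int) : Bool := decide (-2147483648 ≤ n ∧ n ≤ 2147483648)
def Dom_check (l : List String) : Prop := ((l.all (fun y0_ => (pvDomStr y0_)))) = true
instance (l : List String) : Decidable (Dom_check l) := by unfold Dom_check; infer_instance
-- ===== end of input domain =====

-- B replaces A's index loop with a defaultdict of counts by a groupby-style run-length
-- encoding followed by two distinctness checks; same return value on every input (idiomatic rewrite, not faster).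


-- ===== PORT A =====
-- the 'for i in range(len(l))' loop of A; d is the defaultdict of counts ("NO" = early return)
def checkGo (l : List String) (d : PySem.Dict String Int) (i : Nat) : String :=
  if h : i < l.length then
    let x := l[i]
    if d.getD x 0 ≠ 0 then
      if PySem.List.pyGetD l ((i : Int) - 1) "" == x then
        checkGo l (d.insert x (d.getD x 0 + 1)) (i + 1)
      else "NO"
    else checkGo l (d.insert x (d.getD x 0 + 1)) (i + 1)
  else
    if (PySem.Set.ofList d.keys).length = (PySem.Set.ofList d.values).length then "YES" else "NO"
termination_by l.length - i

def check (l : List String) : String := checkGo l PySem.Dict.empty 0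

-- ===== PORT B =====
-- itertools.groupby run-length encoding of Source B, consumed left to right: (value, run length) pairs
def runsOf (l : List String) : List (String × Int) :=
  l.foldl (fun rs x =>
    match rs.getLast? with
    | some (y, n) => if y = x then rs.dropLast ++ [(y, n + 1)] else rs ++ [(x, 1)]
    | none => [(x, 1)]) []

def check_alt (l : List String) : String :=
  let rs := runsOf l
  if (PySem.Set.ofList (rs.map Prod.fst)).length ≠ rs.length then "NO"
  else if (PySem.Set.ofList (rs.map Prod.snd)).length = rs.length then "YES" else "NO"

-- ⟦library part from s1, assume proven; re-elaborated here⟧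

-- ===== PRECONDITION & SPEC =====
def Spec_check (l : List String) (out : String) : Prop := out = check_alt l
instance (l : List String) (out : String) : Decidable (Spec_check l out) := by unfold Spec_check; infer_instance

-- ===== CLAIM (what is proved, stated in full; the proofs are below) =====
def Claim_equal_check : Prop := ∀ (l : List String), Dom_check l → Spec_check l (check l)

-- ===== LEMMAS AND PROOFS =====

-- one groupby step (what the foldl body of runsOf does to the accumulated run list)
def rstep (rs : List (String × Int)) (x : String) : List (String × Int) :=
  match rs.getLast? with
  | some (y, n) => if y = x then rs.dropLast ++ [(y, n + 1)] else rs ++ [(x, 1)]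
  | none => [(x, 1)]

theorem runsOf_snoc (s : List String) (x : String) :
    runsOf (s ++ [x]) = rstep (runsOf s) x := by
  simp [runsOf, List.foldl_append, rstep]

theorem rstep_nil (x : String) : rstep [] x = [(x, 1)] := rfl

theorem rstep_snoc_same (rs : List (String × Int)) (x : String) (n : Int) :
    rstep (rs ++ [(x, n)]) x = rs ++ [(x, n + 1)] := by
  simp [rstep]

theorem rstep_snoc_ne (rs : List (String × Int)) (y x : String) (n : Int) (h : y ≠ x) :
    rstep (rs ++ [(y, n)]) x = (rs ++ [(y, n)]) ++ [(x, 1)] := by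
  simp [rstep, h]

-- every non-nil list of pairs is front ++ [last]

theorem snoc_decomp {α β : Type} (rs : List (α × β)) (h : rs ≠ []) :
    ∃ front y n, rs = front ++ [(y, n)] := by
  rcases List.eq_nil_or_concat rs with h0 | ⟨front, ⟨y, n⟩, hd⟩
  · exact absurd h0 h
  · exact ⟨front, y, n, by simpa using hd⟩

theorem runsOf_eq_nil_iff (s : List String) : runsOf s = [] ↔ s = [] := by
  induction s using List.reverseRecOn with
  | nil => simp [runsOf]
  | append_singleton s x ih =>
    rw [runsOf_snoc]
    constructor
    · intro h
      exfalso
      by_cases hs : runsOf s = []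
      · rw [hs, rstep_nil] at h; simp at h
      · obtain ⟨front, y, n, hd⟩ := snoc_decomp _ hs
        rw [hd] at h
        by_cases hyx : y = x
        · subst hyx; rw [rstep_snoc_same] at h; simp at h
        · rw [rstep_snoc_ne _ _ _ _ hyx] at h; simp at h
    · intro h; simp at h

-- the fst-image of one step: unchanged, or x appended

theorem length_ofList_lt_of_not_nodup {α : Type} [BEq α] [LawfulBEq α] :
    ∀ (xs : List α), ¬ xs.Nodup → (PySem.Set.ofList xs).length < xs.length := by
  intro xs
  induction xs using List.reverseRecOn with
  | nil => intro h; exact absurd List.nodup_nil h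
  | append_singleton xs x ih =>
    intro h
    rw [PySem.Set.ofList_append_singleton]
    by_cases hx : x ∈ PySem.Set.ofList xs
    · rw [PySem.Set.add_of_mem hx]
      calc (PySem.Set.ofList xs).length ≤ xs.length := PySem.Set.length_ofList_le xs
        _ < (xs ++ [x]).length := by simp
    · have hx' : x ∉ xs := fun hm => hx ((PySem.Set.mem_ofList xs x).mpr hm)
      have hxs : ¬ xs.Nodup := by
        intro hnd
        exact h (by
          rw [List.nodup_append]
          exact ⟨hnd, List.nodup_singleton x, by
            intro a ha b hb hab
            simp only [List.mem_singleton] at hb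
            rw [hb] at hab
            exact hx' (hab ▸ ha)⟩)
      rw [PySem.Set.add_of_not_mem hx]
      have := ih hxs
      simp only [List.length_append, List.length_singleton]
      omega

theorem rstep_fst (rs : List (String × Int)) (x : String) :
    (rstep rs x).map Prod.fst = rs.map Prod.fst ∨
    (rstep rs x).map Prod.fst = rs.map Prod.fst ++ [x] := by
  by_cases hs : rs = []
  · subst hs; right; simp [rstep_nil]
  · obtain ⟨front, y, n, hd⟩ := snoc_decomp _ hs
    subst hd
    by_cases hyx : y = x
    · subst hyx; left; rw [rstep_snoc_same]; simp
    · right; rw [rstep_snoc_ne _ _ _ _ hyx]; simp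

theorem mem_fst_rstep (rs : List (String × Int)) (x v : String) :
    v ∈ (rstep rs x).map Prod.fst ↔ v = x ∨ v ∈ rs.map Prod.fst := by
  by_cases hs : rs = []
  · subst hs; simp [rstep_nil]
  · obtain ⟨front, y, n, hd⟩ := snoc_decomp _ hs
    subst hd
    by_cases hyx : y = x
    · subst hyx
      rw [rstep_snoc_same]
      simp only [List.map_append]
      simp only [List.map_cons, List.map_nil, List.mem_append, List.mem_singleton]
      tauto
    · rw [rstep_snoc_ne _ _ _ _ hyx]
      simp only [List.map_append, List.map_cons, List.map_nil, List.mem_append,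
        List.mem_singleton]
      tauto

theorem mem_fst_runsOf (v : String) (s : List String) :
    v ∈ (runsOf s).map Prod.fst ↔ v ∈ s := by
  induction s using List.reverseRecOn with
  | nil => simp [runsOf]
  | append_singleton s x ih =>
    rw [runsOf_snoc, mem_fst_rstep, ih]
    simp [or_comm]

theorem last_fst_rstep (rs : List (String × Int)) (x : String) :
    (rstep rs x).getLast?.map Prod.fst = some x := by
  by_cases hs : rs = []
  · subst hs; simp [rstep_nil]
  · obtain ⟨front, y, n, hd⟩ := snoc_decomp _ hs
    subst hd
    by_cases hyx : y = x
    · subst hyx; rw [rstep_snoc_same]; simp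
    · rw [rstep_snoc_ne _ _ _ _ hyx]; simp

theorem last_fst_runsOf (s : List String) :
    (runsOf s).getLast?.map Prod.fst = s.getLast? := by
  induction s using List.reverseRecOn with
  | nil => simp [runsOf]
  | append_singleton s x _ => rw [runsOf_snoc, last_fst_rstep]; simp

theorem pos_rstep (rs : List (String × Int)) (x : String)
    (h : ∀ q ∈ rs, 0 < q.2) : ∀ p ∈ rstep rs x, 0 < p.2 := by
  by_cases hs : rs = []
  · subst hs; rw [rstep_nil]; intro p hp; simp at hp; subst hp; norm_num
  · obtain ⟨front, y, n, hd⟩ := snoc_decomp _ hs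
    subst hd
    by_cases hyx : y = x
    · subst hyx
      rw [rstep_snoc_same]
      intro p hp
      rcases List.mem_append.mp hp with h1 | h1
      · exact h p (List.mem_append_left _ h1)
      · simp only [List.mem_singleton] at h1
        subst h1
        have := h (y, n) (List.mem_append_right _ (by simp))
        simp only at this ⊢
        omega
    · rw [rstep_snoc_ne _ _ _ _ hyx]
      intro p hp
      rcases List.mem_append.mp hp with h1 | h1
      · exact h p h1
      · simp only [List.mem_singleton] at h1; subst h1; norm_num

theorem pos_runsOf (s : List String) : ∀ p ∈ runsOf s, 0 < p.2 := by
  induction s using List.reverseRecOn with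
  | nil => simp [runsOf]
  | append_singleton s x ih => rw [runsOf_snoc]; exact pos_rstep _ _ ih

theorem not_nodup_fst_runsOf_append (s t : List String)
    (h : ¬ ((runsOf s).map Prod.fst).Nodup) :
    ¬ ((runsOf (s ++ t)).map Prod.fst).Nodup := by
  induction t using List.reverseRecOn with
  | nil => simpa using h
  | append_singleton t x ih =>
    rw [← List.append_assoc, runsOf_snoc]
    rcases rstep_fst (runsOf (s ++ t)) x with he | he
    · rw [he]; exact ih
    · rw [he]
      intro hnd
      exact ih hnd.of_append_left

theorem items_update_last (front : List (String × Int)) (x : String) (n v : Int)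
    (hx : x ∉ front.map Prod.fst) :
    (front ++ [(x, n)]).map (fun p => if (p.1 == x) = true then (x, v) else p)
      = front ++ [(x, v)] := by
  rw [List.map_append]
  congr 1
  · have hcg : List.map (fun p => if (p.1 == x) = true then (x, v) else p) front
        = List.map id front := by
      apply List.map_congr_left
      intro p hp
      have : p.1 ≠ x := fun he => hx (he ▸ List.mem_map_of_mem hp)
      simp [this]
    simpa using hcg
  · simp

theorem go_final (l : List String) (d : PySem.Dict String Int)
    (hitems : d.items = runsOf l)
    (hnd : ((runsOf l).map Prod.fst).Nodup) :
    checkGo l d l.length = check_alt l := by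
  rw [checkGo, dif_neg (lt_irrefl l.length)]
  have hkeys : d.keys = (runsOf l).map Prod.fst := by
    simp only [PySem.Dict.keys, hitems]
  have hvals : d.values = (runsOf l).map Prod.snd := by
    simp only [PySem.Dict.values, hitems]
  have hof : PySem.Set.ofList ((runsOf l).map Prod.fst) = (runsOf l).map Prod.fst :=
    PySem.Set.ofList_eq_self_of_nodup _ hnd
  have hlen : (PySem.Set.ofList ((runsOf l).map Prod.fst)).length = (runsOf l).length := by
    rw [hof]; simp
  have halt : check_alt l
      = if (PySem.Set.ofList ((runsOf l).map Prod.snd)).length = (runsOf l).length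
        then "YES" else "NO" := by
    simp only [check_alt]
    rw [if_neg (by simp [hlen])]
  rw [hkeys, hvals, halt, hlen]
  by_cases hc : (PySem.Set.ofList ((runsOf l).map Prod.snd)).length = (runsOf l).length
  · rw [if_pos hc.symm, if_pos hc]
  · rw [if_neg (fun he => hc he.symm), if_neg hc]

theorem go_eq (l : List String) : ∀ (k i : Nat) (d : PySem.Dict String Int),
    l.length - i ≤ k → i ≤ l.length →
    d.items = runsOf (l.take i) →
    ((runsOf (l.take i)).map Prod.fst).Nodup →
    checkGo l d i = check_alt l := by
  intro k
  induction k with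
  | zero =>
    intro i d hk hi hitems hnd
    have hieq : i = l.length := by omega
    subst hieq
    rw [List.take_length] at hitems hnd
    rw [go_final l d hitems hnd]
  | succ k ih =>
    intro i d hk hi hitems hnd
    by_cases h : i < l.length
    · -- one loop step
      have hx : l[i]? = some l[i] := List.getElem?_eq_getElem h
      have htake : l.take (i + 1) = l.take i ++ [l[i]] := by
        rw [List.take_add_one, hx]; rfl
      have hkeys : d.keys = (runsOf (l.take i)).map Prod.fst := by
        simp only [PySem.Dict.keys, hitems]
      have hndk : d.keys.Nodup := by rw [hkeys]; exact hnd
      rw [checkGo]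
      rw [dif_pos h]
      set x := l[i] with hxdef
      by_cases hmem : x ∈ l.take i
      · -- seen before: count ≠ 0
        obtain ⟨v, hv⟩ : ∃ v, (x, v) ∈ runsOf (l.take i) := by
          have : x ∈ (runsOf (l.take i)).map Prod.fst := (mem_fst_runsOf x _).mpr hmem
          obtain ⟨⟨a, b⟩, hab, he⟩ := List.mem_map.mp this
          exact ⟨b, he ▸ hab⟩
        have hgd : d.getD x 0 = v :=
          PySem.Dict.getD_of_mem_items d (hitems ▸ hv) hndk 0
        have hvpos : 0 < v := pos_runsOf _ _ hv
        rw [if_pos (by rw [hgd]; omega)]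
        -- i ≥ 1
        have hi1 : 1 ≤ i := by
          by_contra h0
          have : i = 0 := by omega
          subst this
          simp at hmem
        -- previous element
        have hprev : PySem.List.pyGetD l ((i : Int) - 1) "" = l[i - 1] := by
          have hc : (i : Int) - 1 = ((i - 1 : Nat) : Int) := by omega
          rw [hc, PySem.List.pyGetD_natCast]
          exact List.getD_eq_getElem l "" (by omega)
        -- take i ends in l[i-1]
        have htke : l.take i = l.take (i - 1) ++ [l[i - 1]] := by
          conv_lhs => rw [show i = (i - 1) + 1 by omega]
          rw [List.take_add_one, List.getElem?_eq_getElem (by omega : i - 1 < l.length)]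
          rfl
        have hlast : (l.take i).getLast? = some l[i - 1] := by
          rw [htke, List.getLast?_concat]
        -- decompose runsOf (take i)
        have hrs_ne : runsOf (l.take i) ≠ [] := by
          rw [ne_eq, runsOf_eq_nil_iff]
          intro he; rw [he] at hmem; simp at hmem
        obtain ⟨front, y, m, hd⟩ := snoc_decomp _ hrs_ne
        have hy : y = l[i - 1] := by
          have := last_fst_runsOf (l.take i)
          rw [hd, hlast, List.getLast?_concat] at this
          simpa using this
        by_cases hadj : l[i - 1] = x
        · -- adjacent equal: increment last run
          rw [if_pos (by simp [hprev, hadj])]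
          have hyx : y = x := hy.trans hadj
          subst hyx
          -- v = m : (x,v) and (x,m) both in rs with nodup fst
          have hfstnd : (front.map Prod.fst ++ [x]).Nodup := by
            have h2 := hnd; rw [hd] at h2; simpa using h2
          have hxnf : x ∉ front.map Prod.fst := by
            rw [List.nodup_append] at hfstnd
            intro hm'
            exact hfstnd.2.2 x hm' x (List.mem_singleton_self x) rfl
          have hveq : v = m := by
            rcases List.mem_append.mp (hd ▸ hv) with h1 | h1
            · exfalso
              have hmm := List.mem_map_of_mem (f := Prod.fst) h1
              simp only at hmm
              exact hxnf hmm
            · simpa using h1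
          -- dict after insert
          have hcont : d.contains x = true := by
            rw [PySem.Dict.contains_eq_decide_mem_keys, hkeys]
            simp [hd]
          have hitems' : (d.insert x (d.getD x 0 + 1)).items = runsOf (l.take (i + 1)) := by
            rw [PySem.Dict.items_insert_of_contains d _ hcont, hitems, hd, hgd, hveq,
              items_update_last front x m (m + 1) hxnf,
              htake, runsOf_snoc, hd, rstep_snoc_same]
          have hnd' : ((runsOf (l.take (i + 1))).map Prod.fst).Nodup := by
            rw [htake, runsOf_snoc, hd, rstep_snoc_same]
            rw [hd] at hnd
            simpa using hnd
          exact ih (i + 1) _ (by omega) (by omega) hitems' hnd'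
        · -- non-adjacent repeat: A returns NO; B rejects duplicate run value
          rw [if_neg (by simp [hprev, hadj])]
          have hyx : y ≠ x := fun he => hadj (hy ▸ he)
          have hdup : ¬ ((runsOf (l.take (i + 1))).map Prod.fst).Nodup := by
            rw [htake, runsOf_snoc, hd, rstep_snoc_ne _ _ _ _ hyx]
            intro hnodup
            have hxin : x ∈ ((front ++ [(y, m)]).map Prod.fst) := by
              rw [← hd]; exact (mem_fst_runsOf x _).mpr hmem
            rw [List.map_append] at hnodup
            rw [List.nodup_append] at hnodup
            exact hnodup.2.2 x hxin x (by simp) rfl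
          have hdupl : ¬ ((runsOf l).map Prod.fst).Nodup := by
            have := not_nodup_fst_runsOf_append (l.take (i + 1)) (l.drop (i + 1)) hdup
            rwa [List.take_append_drop] at this
          have hlt := length_ofList_lt_of_not_nodup _ hdupl
          have hne : (PySem.Set.ofList ((runsOf l).map Prod.fst)).length ≠ (runsOf l).length := by
            simp only [List.length_map] at hlt
            omega
          simp only [check_alt]
          rw [if_pos hne]
      · -- fresh value: count = 0, start a new run
        have hcont : d.contains x = false := by
          rw [PySem.Dict.contains_eq_decide_mem_keys, hkeys]
          simp only [decide_eq_false_iff_not]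
          rw [mem_fst_runsOf]
          exact hmem
        have hgd : d.getD x 0 = 0 := PySem.Dict.getD_of_not_contains d 0 hcont
        rw [if_neg (by rw [hgd]; simp)]
        have hstep : runsOf (l.take (i + 1)) = runsOf (l.take i) ++ [(x, 1)] := by
          rw [htake, runsOf_snoc]
          by_cases hrs : runsOf (l.take i) = []
          · rw [hrs, rstep_nil]; simp
          · obtain ⟨front, y, m, hd⟩ := snoc_decomp _ hrs
            have hyx : y ≠ x := by
              intro he
              apply hmem
              rw [← mem_fst_runsOf x (l.take i), hd]
              simp [he]
            rw [hd, rstep_snoc_ne _ _ _ _ hyx]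
        have hitems' : (d.insert x (d.getD x 0 + 1)).items = runsOf (l.take (i + 1)) := by
          rw [PySem.Dict.items_insert_of_not_contains d _ hcont, hitems, hgd, hstep]
          norm_num
        have hnd' : ((runsOf (l.take (i + 1))).map Prod.fst).Nodup := by
          rw [hstep, List.map_append]
          rw [List.nodup_append]
          refine ⟨hnd, by simp, ?_⟩
          intro a ha b hb hab
          simp only [List.map_cons, List.map_nil, List.mem_singleton] at hb
          rw [hb] at hab
          rw [hab] at ha
          exact hmem ((mem_fst_runsOf _ _).mp ha)
        exact ih (i + 1) _ (by omega) (by omega) hitems' hnd'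
    · have hieq : i = l.length := by omega
      subst hieq
      rw [List.take_length] at hitems hnd
      exact go_final l d hitems hnd

theorem check_eq_alt (l : List String) : check l = check_alt l := by
  rw [check]
  exact go_eq l l.length 0 PySem.Dict.empty (by omega) (by omega)
    (by simp [runsOf, PySem.Dict.empty]) (by simp [runsOf])

-- ===== VERDICT (by name: the statement is the Claim_ definition above) =====
theorem check_spec : Claim_equal_check := by
  intro l _
  unfold Spec_check
  exact check_eq_alt l
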